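-- pv_equiv track=rewrite | github.com/Omkaragrawal/responsive_web-design-react | Front-End Web Development with React/Week2&3/Review3/abc.py | solution
-- ===== SOURCE A (Python) =====
-- def solution(data, n):
--     # Your code here
--     if n == 0:
--         return []
--     else:
--         return_list = []
--         for i in range(0, len(data)):
--             count = data.count(data[i])
--             if count <= n:
--                 return_list.append(data[i])
--         return return_list
-- ===== SOURCE B (Python) =====
-- def solution(data, n):
--     if n <= 0:
--         return []
--     s = sorted(data)
--     banned = {s[i] for i in range(len(s) - n) if s[i] == s[i + n]}
--     return [x for x in data if x not in banned]
-- ===== Notes on version B (the rewrite author's own statement) =====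
-- stated objective: faster
-- what changed: Replaces the per-element data.count scan with a sort-based algorithm: sort a copy of data, detect over-represented values by the offset test sorted[i] == sorted[i+n] (which in a sorted list holds iff the value occurs more than n times), collect those values into a banned set, and emit data filtered by non-membership.
import Mathlib
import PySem

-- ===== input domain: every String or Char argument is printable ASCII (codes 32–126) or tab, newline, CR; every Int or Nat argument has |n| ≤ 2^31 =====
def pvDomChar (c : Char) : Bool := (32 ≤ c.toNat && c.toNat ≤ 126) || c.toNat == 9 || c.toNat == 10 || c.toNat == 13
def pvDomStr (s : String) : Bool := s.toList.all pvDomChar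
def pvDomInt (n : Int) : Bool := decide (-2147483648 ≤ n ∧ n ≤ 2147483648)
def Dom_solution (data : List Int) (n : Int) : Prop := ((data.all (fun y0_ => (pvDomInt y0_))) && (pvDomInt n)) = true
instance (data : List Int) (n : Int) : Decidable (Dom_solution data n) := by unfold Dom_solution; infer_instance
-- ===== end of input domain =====

-- B replaces A's per-element data.count scan with sort + offset test (sorted[i] == sorted[i+n]
-- marks values occurring more than n times) + a banned-set membership filter.


-- ===== PORT A =====
def solution (data : List Int) (n : Int) : List Int :=
  if n == 0 then []
  else
    (PySem.List.pyRange 0 (data.length : Int) 1).foldl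
      (fun return_list i =>
        let count : Int := (PySem.List.count data (PySem.List.pyGetD data i 0) : Int)
        if count ≤ n then return_list ++ [PySem.List.pyGetD data i 0] else return_list)
      []

-- ===== PORT B =====
def solution_alt (data : List Int) (n : Int) : List Int :=
  if n ≤ 0 then []
  else
    let s := PySem.List.sorted data (fun x => x) false
    let banned : PySem.Set Int := PySem.Set.ofList
      (((PySem.List.pyRange 0 ((s.length : Int) - n) 1).filter
          (fun i => PySem.List.pyGetD s i 0 == PySem.List.pyGetD s (i + n) 0)).map
        (fun i => PySem.List.pyGetD s i 0))
    data.filter (fun x => !(PySem.Set.contains banned x))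

-- ===== PRECONDITION & SPEC =====
def Spec_solution (data : List Int) (n : Int) (out : List Int) : Prop := out = solution_alt data n
instance (data : List Int) (n : Int) (out : List Int) : Decidable (Spec_solution data n out) := by unfold Spec_solution; infer_instance

-- ===== CLAIM (what is proved, stated in full; the proofs are below) =====
def Claim_equal_solution : Prop := ∀ (data : List Int) (n : Int), Dom_solution data n → Spec_solution data n (solution data n)

-- ===== LEMMAS AND PROOFS =====

-- A is a count-filter (for n ≠ 0)
theorem solution_eq_filter (data : List Int) (n : Int) (hn : n ≠ 0) :
    solution data n = data.filter (fun x => decide ((List.count x data : Int) ≤ n)) := by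
  unfold solution
  rw [if_neg (by simpa using hn)]
  rw [PySem.List.foldl_pyRange_zero_pyGetD' data 0
    (fun acc x => if ((PySem.List.count data x : Int)) ≤ n then acc ++ [x] else acc) []]
  rw [PySem.List.foldl_append_ite_eq_filter]
  simp only [PySem.List.count_eq, List.nil_append]
  rfl

-- the elements equal to v of a ≤-sorted list form one contiguous block of length count
theorem sorted_decomp (v : Int) : ∀ (s : List Int), s.Pairwise (· ≤ ·) →
    ∃ a b : List Int, s = a ++ List.replicate (s.count v) v ++ b ∧
      (∀ y ∈ a, y ≠ v) ∧ (∀ y ∈ b, v < y) := by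
  intro s
  induction s with
  | nil => exact fun _ => ⟨[], [], by simp, by simp, by simp⟩
  | cons x xs ih =>
    intro hs
    rcases List.pairwise_cons.mp hs with ⟨hx, hxs⟩
    rcases ih hxs with ⟨a, b, hdec, ha, hb⟩
    by_cases hxv : x = v
    · subst hxv
      by_cases hc : xs.count x = 0
      · refine ⟨[], a ++ b, ?_, by simp, ?_⟩
        · rw [List.nil_append, List.count_cons_self, hc]
          rw [hc] at hdec
          simp only [List.replicate_succ, List.replicate_zero, List.cons_append,
            List.nil_append] at hdec ⊢
          rw [hdec]
          simp
        · intro y hy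
          have hymem : y ∈ xs := by
            rw [hdec, hc]; simpa using hy
          have hle := hx y hymem
          rcases List.mem_append.mp hy with h | h
          · exact lt_of_le_of_ne hle (Ne.symm (ha y h))
          · exact hb y h
      · have ha0 : a = [] := by
          cases a with
          | nil => rfl
          | cons z a' =>
            exfalso
            have hz : z ≠ x := ha z (by simp)
            have hzx : x ≤ z := hx z (by rw [hdec]; simp)
            rw [hdec] at hxs
            simp only [List.cons_append] at hxs
            have hz_le := (List.pairwise_cons.mp hxs).1
            have hxmem : x ∈ a' ++ (List.replicate (xs.count x) x ++ b) := by
              have : x ∈ List.replicate (xs.count x) x := by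
                simp [List.mem_replicate]; omega
              simp only [List.mem_append]
              exact Or.inr (Or.inl this)
            have : z ≤ x := hz_le x (by simpa using hxmem)
            exact hz (le_antisymm this hzx)
        subst ha0
        refine ⟨[], b, ?_, by simp, hb⟩
        rw [List.nil_append] at hdec ⊢
        have hcb : List.count x b = 0 :=
          List.count_eq_zero.mpr (fun hmem => absurd (hb x hmem) (lt_irrefl x))
        rw [List.count_cons_self, List.replicate_succ, List.cons_append, hdec]
        simp [List.count_append, hcb]
    · refine ⟨x :: a, b, ?_, ?_, hb⟩
      · have hcnt : (x :: xs).count v = xs.count v := List.count_cons_of_ne hxv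
        rw [hcnt]
        simp only [List.cons_append]
        exact congrArg _ hdec
      · intro y hy
        rcases List.mem_cons.mp hy with h | h
        · subst h; exact hxv
        · exact ha y h

-- indices inside the block read v
theorem getElem?_block (a b : List Int) (c : Nat) (v : Int) (j : Nat) (hj : j < c) :
    (a ++ List.replicate c v ++ b)[a.length + j]? = some v := by
  rw [List.append_assoc, List.getElem?_append_right (by omega)]
  have h1 : a.length + j - a.length = j := by omega
  rw [h1, List.getElem?_append_left (by simpa using hj), List.getElem?_replicate]
  simp [hj]

-- offset test characterises "count > k" on a sorted list
theorem offset_iff (s : List Int) (hs : s.Pairwise (· ≤ ·)) (k : Nat) (v : Int) :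
    (∃ i : Nat, s[i]? = some v ∧ s[i + k]? = some v) ↔ k < s.count v := by
  rcases sorted_decomp v s hs with ⟨a, b, hdec, ha, hb⟩
  set c := s.count v with hc
  constructor
  · rintro ⟨i, h1, h2⟩
    have hi_lo : a.length ≤ i := by
      by_contra h
      push Not at h
      have hsa : s[i]? = a[i]? := by
        rw [hdec, List.append_assoc, List.getElem?_append_left h]
      rw [hsa] at h1
      exact (ha v (List.mem_of_getElem? h1)) rfl
    have hi_hi : i + k < a.length + c := by
      by_contra h
      push Not at h
      have hsb : s[i + k]? = b[i + k - a.length - c]? := by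
        rw [hdec, List.append_assoc, List.getElem?_append_right (by omega),
          List.getElem?_append_right (by simp; omega)]
        simp
      rw [hsb] at h2
      exact absurd (hb v (List.mem_of_getElem? h2)) (lt_irrefl v)
    omega
  · intro hk
    refine ⟨a.length, ?_, ?_⟩
    · have h0 := getElem?_block a b c v 0 (by omega)
      rw [hdec]
      simpa using h0
    · rw [hdec]
      exact getElem?_block a b c v k hk

-- B's banned set holds exactly the values occurring more than n times (0 < n)
theorem mem_banned_iff (data : List Int) (n : Int) (hn : 0 < n) (v : Int) :
    (v ∈ (((PySem.List.pyRange 0 (((PySem.List.sorted data (fun x => x) false).length : Int) - n) 1).filter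
          (fun i => PySem.List.pyGetD (PySem.List.sorted data (fun x => x) false) i 0 ==
                    PySem.List.pyGetD (PySem.List.sorted data (fun x => x) false) (i + n) 0)).map
        (fun i => PySem.List.pyGetD (PySem.List.sorted data (fun x => x) false) i 0)))
      ↔ (n : Int) < (data.count v : Int) := by
  set s := PySem.List.sorted data (fun x => x) false with hsdef
  have hsort : s.Pairwise (· ≤ ·) := by
    simpa using PySem.List.sorted_pairwise data (fun x => x)
  have hperm : s.Perm data := PySem.List.sorted_perm data (fun x => x) false
  have hcount : s.count v = data.count v := hperm.count_eq v
  set k := n.toNat with hk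
  have hkn : (k : Int) = n := Int.toNat_of_nonneg (by omega)
  constructor
  · intro hv
    rcases List.mem_map.mp hv with ⟨i, hi, hvi⟩
    rcases List.mem_filter.mp hi with ⟨hir, hieq⟩
    rcases PySem.List.mem_pyRange_one.mp hir with ⟨hi0, hilt⟩
    set j := i.toNat with hj
    have hji : (j : Int) = i := Int.toNat_of_nonneg hi0
    have hjk : j + k < s.length := by omega
    have e1 : PySem.List.pyGetD s i 0 = s.getD j 0 := by
      rw [← hji, PySem.List.pyGetD_natCast]
    have e2 : PySem.List.pyGetD s (i + n) 0 = s.getD (j + k) 0 := by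
      rw [show i + n = ((j + k : Nat) : Int) by push_cast; omega, PySem.List.pyGetD_natCast]
    have hg1 : s[j]? = some v := by
      have hv1 : s.getD j 0 = v := by rw [← e1, hvi]
      rw [List.getD_eq_getElem?_getD, List.getElem?_eq_getElem (by omega)] at hv1
      rw [List.getElem?_eq_getElem (by omega)]
      simpa using hv1
    have hg2 : s[j + k]? = some v := by
      have heq : s.getD j 0 = s.getD (j + k) 0 := by
        have hbeq := of_decide_eq_true (by simpa [e1, e2] using hieq)
        simpa using hbeq
      have hv2 : s.getD (j + k) 0 = v := by rw [← heq, ← e1, hvi]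
      rw [List.getD_eq_getElem?_getD, List.getElem?_eq_getElem hjk] at hv2
      rw [List.getElem?_eq_getElem hjk]
      simpa using hv2
    have hlt := (offset_iff s hsort k v).mp ⟨j, hg1, hg2⟩
    omega
  · intro hv
    have hk_lt : k < s.count v := by omega
    rcases (offset_iff s hsort k v).mpr hk_lt with ⟨j, hg1, hg2⟩
    have hjk : j + k < s.length := (List.getElem?_eq_some_iff.mp hg2).1
    refine List.mem_map.mpr ⟨(j : Int), List.mem_filter.mpr ⟨?_, ?_⟩, ?_⟩
    · exact PySem.List.mem_pyRange_one.mpr ⟨by positivity, by omega⟩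
    · have e1 : PySem.List.pyGetD s (j : Int) 0 = v := by
        rw [PySem.List.pyGetD_natCast, List.getD_eq_getElem?_getD, hg1]
        rfl
      have e2 : PySem.List.pyGetD s ((j : Int) + n) 0 = v := by
        rw [show (j : Int) + n = ((j + k : Nat) : Int) by omega,
          PySem.List.pyGetD_natCast, List.getD_eq_getElem?_getD, hg2]
        rfl
      simp [e1, e2]
    · rw [PySem.List.pyGetD_natCast, List.getD_eq_getElem?_getD, hg1]
      rfl

theorem solution_spec' (data : List Int) (n : Int) :
    solution data n = solution_alt data n := by
  by_cases hn0 : n = 0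
  · subst hn0
    unfold solution solution_alt
    simp
  · rw [solution_eq_filter data n hn0]
    by_cases hneg : n ≤ 0
    · unfold solution_alt
      rw [if_pos hneg]
      rw [List.filter_eq_nil_iff]
      intro x hx
      have hpos : 0 < data.count x := List.count_pos_iff.mpr hx
      simp only [decide_eq_true_eq]
      omega
    · push Not at hneg
      unfold solution_alt
      rw [if_neg (by omega)]
      apply List.filter_congr
      intro x _
      have hmb := mem_banned_iff data n hneg x
      have hcx : PySem.Set.contains (PySem.Set.ofList
          (((PySem.List.pyRange 0 (((PySem.List.sorted data (fun x => x) false).length : Int) - n) 1).filter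
            (fun i => PySem.List.pyGetD (PySem.List.sorted data (fun x => x) false) i 0 ==
                      PySem.List.pyGetD (PySem.List.sorted data (fun x => x) false) (i + n) 0)).map
            (fun i => PySem.List.pyGetD (PySem.List.sorted data (fun x => x) false) i 0))) x
          = true ↔ (n : Int) < (data.count x : Int) := by
        rw [PySem.Set.contains_iff, PySem.Set.mem_ofList]
        exact hmb
      by_cases hle : (data.count x : Int) ≤ n
      · have hnlt : ¬ ((n : Int) < (data.count x : Int)) := by omega
        have hfalse : PySem.Set.contains (PySem.Set.ofList
            (((PySem.List.pyRange 0 (((PySem.List.sorted data (fun x => x) false).length : Int) - n) 1).filter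
              (fun i => PySem.List.pyGetD (PySem.List.sorted data (fun x => x) false) i 0 ==
                        PySem.List.pyGetD (PySem.List.sorted data (fun x => x) false) (i + n) 0)).map
              (fun i => PySem.List.pyGetD (PySem.List.sorted data (fun x => x) false) i 0))) x = false := by
          rw [Bool.eq_false_iff]
          intro h
          exact hnlt (hcx.mp h)
        rw [hfalse]
        simp only [Bool.not_false]
        exact decide_eq_true hle
      · have hlt : (n : Int) < (data.count x : Int) := by omega
        rw [hcx.mpr hlt]
        simp only [Bool.not_true]
        exact decide_eq_false hle

-- ===== VERDICT (by name: the statement is the Claim_ definition above) =====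
theorem solution_spec : Claim_equal_solution := by
  intro data n _
  unfold Spec_solution
  exact solution_spec' data n
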